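-- pv_equiv track=rewrite | github.com/md-pranta/leetcode-lintcode | printX.py | printX
-- ===== SOURCE A (Python) =====
-- def printX(n):
--     # write your code here.
--     A = [[''] * n for i in range(n)]
--     for i in range(n):
--         for j in range(n):
--             if i == j or i == n-j-1:
--                 A[i][j] = 'X'
--             else:
--                 A[i][j] = ' '
--     return [''.join(i) for i in A]
-- ===== SOURCE B (Python) =====
-- def printX(n):
--     res = []
--     for i in range(n):
--         row = [' '] * n
--         row[i] = 'X'
--         row[n - 1 - i] = 'X'
--         res.append(''.join(row))
--     return res
-- ===== Notes on version B (the rewrite author's own statement) =====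
-- stated objective: simpler
-- what changed: Replaces A's full n-by-n scan with a per-cell branch by a single loop over rows that builds a row of spaces and directly writes 'X' at the two diagonal positions i and n-1-i.
import Mathlib
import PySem

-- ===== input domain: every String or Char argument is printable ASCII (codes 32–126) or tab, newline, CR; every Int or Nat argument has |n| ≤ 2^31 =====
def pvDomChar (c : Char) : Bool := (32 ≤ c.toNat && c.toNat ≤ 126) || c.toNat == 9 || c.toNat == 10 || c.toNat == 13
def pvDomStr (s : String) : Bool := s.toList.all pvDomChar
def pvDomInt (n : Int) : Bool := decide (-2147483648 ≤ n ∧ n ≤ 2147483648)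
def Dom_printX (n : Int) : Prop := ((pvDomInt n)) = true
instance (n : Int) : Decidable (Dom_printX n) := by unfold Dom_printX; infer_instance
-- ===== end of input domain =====

-- B replaces A's per-cell branch over every (i,j) by one loop over rows that
-- writes 'X' directly at the two diagonal indices i and n-1-i (simpler).

-- ===== PORT A =====
-- A: build n×n grid of '' placeholders, then fill every cell by a nested loop
-- with the diagonal test, then join each row.
def printX (n : Int) : List String :=
  let A0 : List (List String) :=
    (PySem.List.pyRange 0 n 1).map (fun _ => List.replicate n.toNat "")
  let A1 : List (List String) :=
    (PySem.List.pyRange 0 n 1).foldl (fun A i =>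
      A.set i.toNat
        ((PySem.List.pyRange 0 n 1).foldl (fun row j =>
            row.set j.toNat (if i = j ∨ i = n - j - 1 then "X" else " "))
          (A.getD i.toNat []))) A0
  A1.map (fun r => PySem.Str.join "" r)

-- ===== PORT B =====
-- B: for each row i, a row of spaces with 'X' set at i and n-1-i, joined.
def printX_alt (n : Int) : List String :=
  (PySem.List.pyRange 0 n 1).foldl (fun res i =>
    res ++ [PySem.Str.join ""
      (((List.replicate n.toNat " ").set i.toNat "X").set (n - 1 - i).toNat "X")]) []

-- ===== PRECONDITION & SPEC =====
def Spec_printX (n : Int) (out : List String) : Prop := out = printX_alt n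
instance (n : Int) (out : List String) : Decidable (Spec_printX n out) := by unfold Spec_printX; infer_instance

-- ===== CLAIM (what is proved, stated in full; the proofs are below) =====
def Claim_equal_printX : Prop := ∀ (n : Int), Dom_printX n → Spec_printX n (printX n)

-- ===== LEMMAS AND PROOFS =====

-- folding 'append one element' builds the map
theorem pv_foldl_append {α β : Type} (g : α → β) (l : List α) (acc : List β) :
    l.foldl (fun res i => res ++ [g i]) acc = acc ++ l.map g := by
  induction l generalizing acc with
  | nil => simp
  | cons x xs ih => simp [List.foldl_cons, ih]

-- setting every index of range m into a list of length ≥ m rewrites its prefix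
theorem pv_foldl_set {β : Type} (f : ℕ → β) :
    ∀ (m : ℕ) (L : List β), m ≤ L.length →
    (List.range m).foldl (fun r j => r.set j (f j)) L
      = (List.range m).map f ++ L.drop m := by
  intro m
  induction m with
  | zero => intro L _; simp
  | succ m ih =>
    intro L h
    rw [List.range_succ, List.foldl_append, List.foldl_cons, List.foldl_nil,
        ih L (by omega)]
    have hlen : ((List.range m).map f).length = m := by simp
    rw [List.set_append_right _ _ (by omega)]
    have hm : m < L.length := by omega
    have hd : L.drop m = L[m] :: L.drop (m+1) := List.drop_eq_getElem_cons hm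
    rw [hd]
    simp only [hlen, Nat.sub_self]
    rw [List.set_cons_zero]
    simp

theorem pv_rowB (n : Int) (i : Int) (h0 : 0 ≤ i) (h1 : i < n) :
    ((List.replicate n.toNat " ").set i.toNat "X").set (n - 1 - i).toNat "X"
      = (List.range n.toNat).map
          (fun (j : ℕ) => if i = (j : Int) ∨ i = n - (j : Int) - 1 then "X" else " ") := by
  apply List.ext_getElem
  · simp
  · intro j hj _
    have hjn : j < n.toNat := by simpa using hj
    rw [List.getElem_map, List.getElem_range]
    simp only [List.getElem_set, List.getElem_replicate]
    split_ifs <;> first | rfl | (exfalso; omega)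

-- both ports equal the same canonical map-of-rows form
theorem pv_canon (n : Int) :
    printX_alt n
      = (List.range n.toNat).map (fun (i : ℕ) => PySem.Str.join ""
          ((List.range n.toNat).map
            (fun (j : ℕ) => if (i : Int) = (j : Int) ∨ (i : Int) = n - (j : Int) - 1 then "X" else " "))) := by
  unfold printX_alt
  rw [PySem.List.pyRange_one, pv_foldl_append, List.map_map]
  simp only [List.nil_append, Int.sub_zero, zero_add]
  apply List.map_congr_left
  intro k hk
  simp only [List.mem_range] at hk
  simp only [Function.comp_apply]
  rw [pv_rowB n (k : Int) (by omega) (by omega)]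

-- outer loop: each row index set once, reading the untouched replicate cell first
theorem pv_foldl_set_getD {β : Type} (g : β → ℕ → β) (c d : β) :
    ∀ (m N : ℕ), m ≤ N →
    (List.range m).foldl (fun r j => r.set j (g (r.getD j d) j)) (List.replicate N c)
      = (List.range m).map (fun j => g c j) ++ List.replicate (N - m) c := by
  intro m
  induction m with
  | zero => intro N _; simp
  | succ m ih =>
    intro N h
    rw [List.range_succ, List.foldl_append, List.foldl_cons, List.foldl_nil, ih N (by omega)]
    have hlen : ((List.range m).map (fun j => g c j)).length = m := by simp
    have hNm : N - m = (N - (m + 1)) + 1 := by omega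
    rw [hNm, List.replicate_succ]
    have hget : (((List.range m).map (fun j => g c j)) ++ c :: List.replicate (N - (m + 1)) c).getD m d = c := by
      simp [List.getD_eq_getElem?_getD, hlen]
    rw [hget, List.set_append_right _ _ (by omega)]
    simp only [hlen, Nat.sub_self]
    rw [List.set_cons_zero]
    simp

theorem pv_A_canon (n : Int) :
    printX n
      = (List.range n.toNat).map (fun (i : ℕ) => PySem.Str.join ""
          ((List.range n.toNat).map
            (fun (j : ℕ) => if (i : Int) = (j : Int) ∨ (i : Int) = n - (j : Int) - 1 then "X" else " "))) := by
  unfold printX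
  rw [PySem.List.pyRange_one]
  have hsub : (n - 0).toNat = n.toNat := by omega
  rw [hsub]
  simp only [zero_add, Int.toNat_natCast, List.foldl_map, List.map_const', List.length_map,
    List.length_range]
  rw [pv_foldl_set_getD
    (fun (c : List String) (k : ℕ) => (List.range n.toNat).foldl
      (fun row (j : ℕ) => row.set j (if (k : Int) = (j : Int) ∨ (k : Int) = n - (j : Int) - 1 then "X" else " ")) c)
    (List.replicate n.toNat "") [] n.toNat n.toNat le_rfl]
  simp only [Nat.sub_self, List.replicate_zero, List.append_nil, List.map_map]
  apply List.map_congr_left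
  intro i _
  simp only [Function.comp_apply]
  rw [pv_foldl_set (fun (j : ℕ) => if (i : Int) = (j : Int) ∨ (i : Int) = n - (j : Int) - 1 then "X" else " ")
      n.toNat (List.replicate n.toNat "") (by simp)]
  simp

-- ===== VERDICT (by name: the statement is the Claim_ definition above) =====
theorem printX_spec : Claim_equal_printX := by
  intro n _
  unfold Spec_printX
  rw [pv_A_canon, pv_canon]
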